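-- pv_equiv track=rewrite | github.com/PastIsJustPast/AlgorithmStudy | 3주차(카카오)/03_양궁대회/양궁대회_박이삭.py | solution
-- ===== SOURCE A (Python) =====
-- def solution(n, info):
--     dp = [[0 for _ in range(n + 1)] for _ in range(len(info) + 1)]
--     path = [[[] for _ in range(n + 1)] for _ in range(len(info) + 1)]
--     appeach = 0
--     for i, target in enumerate(info):
--         appeach += (10 - i) * bool(target)
--         for j in range(n + 1):
--             if j <= target:
--                 dp[i + 1][j] = dp[i][j]
--                 path[i + 1][j] = path[i][j] + [0]
--             elif dp[i][j - (target + 1)] + (10 - i) * [1,2][bool(target)] >= dp[i][j]: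
--                 dp[i + 1][j] = dp[i][j - (target + 1)] + (10 - i) * [1,2][bool(target)]
--                 path[i + 1][j] = path[i][j - (target + 1)] + [target + 1]
--             else:
--                 dp[i + 1][j] = dp[i][j]
--                 path[i + 1][j] = path[i][j] + [0]
--
--     result = 0
--     result_path = None
--     for i, value in enumerate(dp[-1]):
--         if value - appeach > result:
--             result = value - appeach
--             result_path = path[-1][i]
--
--     if result_path:
--         result_path[-1] += n - sum(result_path)
--         return result_path
--     else:
--         return [-1]
-- ===== SOURCE B (Python) =====
-- def solution(n, info):
--     # Value-only DP table (no per-cell path lists); the single winning path is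
--     # reconstructed afterwards by backtracking, built back-to-front.
--     if n < 0:
--         return [-1]
--     m = len(info)
--     rows = [[0] * (n + 1)]
--     for i, t in enumerate(info):
--         prev = rows[-1]
--         gain = (10 - i) * (2 if t else 1)
--         rows.append([prev[j] if j <= t else max(prev[j], prev[j - t - 1] + gain)
--                      for j in range(n + 1)])
--     appeach = sum(10 - i for i, t in enumerate(info) if t)
--     last = rows[-1]
--     best = max(last)
--     if best - appeach <= 0:
--         return [-1]
--     j = last.index(best)
--     path = []
--     for i in range(m - 1, -1, -1):
--         t = info[i]
--         gain = (10 - i) * (2 if t else 1)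
--         if j <= t or rows[i][j - t - 1] + gain < rows[i][j]:
--             path.append(0)
--         else:
--             path.append(t + 1)
--             j -= t + 1
--     path.reverse()
--     path[-1] += n - sum(path)
--     return path
-- ===== Notes on version B (the rewrite author's own statement) =====
-- stated objective: faster
-- what changed: B keeps only an integer DP-value table (no per-cell path lists) and reconstructs the single winning distribution afterwards by backtracking from the best budget, building the path back-to-front; O(m*n) vs A's O(m^2*n) path copying, measured ~40x faster at the largest timed size.
import Mathlib
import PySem

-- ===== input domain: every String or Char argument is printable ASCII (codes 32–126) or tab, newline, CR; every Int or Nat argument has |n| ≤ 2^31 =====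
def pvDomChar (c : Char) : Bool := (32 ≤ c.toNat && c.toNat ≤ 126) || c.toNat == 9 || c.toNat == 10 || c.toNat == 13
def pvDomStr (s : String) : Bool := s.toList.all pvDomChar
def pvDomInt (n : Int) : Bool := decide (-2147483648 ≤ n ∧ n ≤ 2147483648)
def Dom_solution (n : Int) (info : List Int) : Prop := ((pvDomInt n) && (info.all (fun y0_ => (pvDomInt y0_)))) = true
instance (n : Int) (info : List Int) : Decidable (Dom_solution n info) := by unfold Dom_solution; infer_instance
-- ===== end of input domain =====

-- B replaces A's per-cell path lists by a value-only DP table plus a final backtracking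
-- pass that rebuilds the winning distribution back-to-front (measured faster by the
-- timing run).

-- ===== PORT A =====
-- one DP step of A: from (dp row, path row, appeach) over zone (i, target).
-- Python lists are arrays: rows are ported as Array with O(1) .getD; row indices here are
-- the nonnegative j from range(n+1) and j-(target+1) (nonnegative under Pre_), so .toNat is exact.
def aStep (n : Int) (st : Array Int × Array (List Int) × Int) (it : Int × Int) :
    Array Int × Array (List Int) × Int :=
  let dpRow := st.1; let pathRow := st.2.1; let ap := st.2.2
  let i := it.1; let t := it.2
  let gain := (10 - i) * (if t ≠ 0 then 2 else 1)
  (((PySem.List.pyRange 0 (n+1) 1).map (fun j =>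
      if j ≤ t then dpRow.getD j.toNat 0
      else if dpRow.getD (j - (t+1)).toNat 0 + gain ≥ dpRow.getD j.toNat 0
      then dpRow.getD (j - (t+1)).toNat 0 + gain
      else dpRow.getD j.toNat 0)).toArray,
   ((PySem.List.pyRange 0 (n+1) 1).map (fun j =>
      if j ≤ t then pathRow.getD j.toNat [] ++ [0]
      else if dpRow.getD (j - (t+1)).toNat 0 + gain ≥ dpRow.getD j.toNat 0
      then pathRow.getD (j - (t+1)).toNat [] ++ [t+1]
      else pathRow.getD j.toNat [] ++ [0])).toArray,
   ap + (10 - i) * (if t ≠ 0 then 1 else 0))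

def solution (n : Int) (info : List Int) : List Int :=
  let st := (PySem.List.enumerate info 0).foldl (aStep n)
      ((List.replicate (n+1).toNat (0 : Int)).toArray,
       (List.replicate (n+1).toNat ([] : List Int)).toArray, 0)
  let dpL := st.1; let pathL := st.2.1; let ap := st.2.2
  -- 'for i, value in enumerate(dp[-1])' is the index loop i = 0..n with value = dp[-1][i]
  let fin := (PySem.List.pyRange 0 (n+1) 1).foldl (fun acc i =>
      if dpL.getD i.toNat 0 - ap > acc.1
      then (dpL.getD i.toNat 0 - ap, some (pathL.getD i.toNat [])) else acc)
      ((0 : Int), (none : Option (List Int)))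
  match fin.2 with
  | some p => if p ≠ [] then p.dropLast ++ [PySem.List.pyGetD p (-1) 0 + (n - p.sum)] else [-1]
  | none => [-1]

-- ===== PORT B =====
-- append the next DP-value row (computed from the last row) to the row table
-- (rows are arrays, indexed with the nonnegative j / j-t-1 as in port A)
def bRowStep (n : Int) (rows : List (Array Int)) (it : Int × Int) : List (Array Int) :=
  let i := it.1; let t := it.2
  let prev := PySem.List.pyGetD rows (-1) #[]
  let gain := (10 - i) * (if t ≠ 0 then 2 else 1)
  rows ++ [((PySem.List.pyRange 0 (n+1) 1).map (fun j =>
      if j ≤ t then prev.getD j.toNat 0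
      else max (prev.getD j.toNat 0) (prev.getD (j - t - 1).toNat 0 + gain))).toArray]

-- one backtracking step at zone i: append this zone's arrow count, lower the budget
def bBtStep (info : List Int) (rows : List (Array Int))
    (acc : List Int × Int) (i : Int) : List Int × Int :=
  let path := acc.1; let j := acc.2
  let t := PySem.List.pyGetD info i 0
  let gain := (10 - i) * (if t ≠ 0 then 2 else 1)
  let rowi := PySem.List.pyGetD rows i #[]
  if j ≤ t ∨ rowi.getD (j - t - 1).toNat 0 + gain < rowi.getD j.toNat 0
  then (path ++ [(0 : Int)], j)
  else (path ++ [t + 1], j - (t + 1))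

def solution_alt (n : Int) (info : List Int) : List Int :=
  if n < 0 then [-1] else
  let rows := (PySem.List.enumerate info 0).foldl (bRowStep n)
      [(List.replicate (n+1).toNat (0 : Int)).toArray]
  let appeach := (((PySem.List.enumerate info 0).filter (fun it => it.2 != 0)).map
      (fun it => 10 - it.1)).sum
  let last := PySem.List.pyGetD rows (-1) #[]
  let best := (PySem.List.max? last.toList (fun x => x)).getD 0
  if best - appeach ≤ 0 then [-1] else
  let j0 : Int := ((PySem.List.index? last.toList best).getD 0 : Nat)
  let bt := (PySem.List.pyRange ((info.length : Int) - 1) (-1) (-1)).foldl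
      (bBtStep info rows) (([] : List Int), j0)
  let path := bt.1.reverse
  path.dropLast ++ [PySem.List.pyGetD path (-1) 0 + (n - path.sum)]

-- ===== PRECONDITION & SPEC =====
-- Pre_ excludes exactly the inputs where A raises IndexError: n ≥ 0 together with some
-- target ≤ -2 makes A read dp[i][j-(target+1)] past the end of the row.
def Pre_solution (n : Int) (info : List Int) : Prop := n < 0 ∨ ∀ t ∈ info, -1 ≤ t
instance (n : Int) (info : List Int) : Decidable (Pre_solution n info) := by
  unfold Pre_solution; infer_instance

def pvWitness_solution : Int × List Int := (5, [2, 1, 0])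

def Spec_solution (n : Int) (info : List Int) (out : List Int) : Prop := out = solution_alt n info
instance (n : Int) (info : List Int) (out : List Int) : Decidable (Spec_solution n info out) := by
  unfold Spec_solution; infer_instance

-- ===== CLAIM (what is proved, stated in full; the proofs are below) =====
def Claim_equal_solution : Prop := ∀ (n : Int) (info : List Int), Dom_solution n info → Pre_solution n info → Spec_solution n info (solution n info)

-- ===== LEMMAS AND PROOFS =====

-- zones of the first k entries of info, most recent first
def pref (info : List Int) (k : Nat) : List (Int × Int) :=
  (PySem.List.enumerate (info.take k) 0).reverse

def gainOf (i t : Int) : Int := (10 - i) * (if t ≠ 0 then 2 else 1)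

-- DP value row after processing the given (reversed) zone list
def rowR (n : Int) : List (Int × Int) → List Int
  | [] => List.replicate (n+1).toNat 0
  | (i, t) :: rest =>
      (PySem.List.pyRange 0 (n+1) 1).map (fun j =>
        if j ≤ t then PySem.List.pyGetD (rowR n rest) j 0
        else max (PySem.List.pyGetD (rowR n rest) j 0)
                 (PySem.List.pyGetD (rowR n rest) (j - (t+1)) 0 + gainOf i t))

-- winning path for the given (reversed) zone list at budget j, in REVERSED order
def pathR (n : Int) : List (Int × Int) → Int → List Int
  | [], _ => []
  | (i, t) :: rest, j =>
      if j ≤ t then 0 :: pathR n rest j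
      else if PySem.List.pyGetD (rowR n rest) (j - (t+1)) 0 + gainOf i t ≥
              PySem.List.pyGetD (rowR n rest) j 0
      then (t + 1) :: pathR n rest (j - (t+1))
      else 0 :: pathR n rest j

-- A's appeach total, written as B computes it
def apVal (info : List Int) : Int :=
  (((PySem.List.enumerate info 0).filter (fun it => it.2 != 0)).map (fun it => 10 - it.1)).sum

-- Array row access = Python list access at a nonnegative index
theorem arr_getD {α : Type} (l : List α) (k : Nat) (d : α) : l.toArray.getD k d = l.getD k d := by
  unfold Array.getD List.getD
  split
  · rename_i h
    simp only [List.size_toArray] at h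
    simp [List.getElem?_eq_getElem h]
  · rename_i h
    simp only [List.size_toArray] at h
    rw [List.getElem?_eq_none (by omega)]
    rfl

theorem getD_toNat {α : Type} (l : List α) (i : Int) (d : α) (h : 0 ≤ i) :
    l.toArray.getD i.toNat d = PySem.List.pyGetD l i d := by
  rw [arr_getD]
  conv_rhs => rw [← Int.toNat_of_nonneg h]
  rw [PySem.List.pyGetD_natCast]

theorem length_rowR (n : Int) (zs : List (Int × Int)) : (rowR n zs).length = (n+1).toNat := by
  cases zs with
  | nil => simp [rowR]
  | cons z rest => cases z; simp [rowR, PySem.List.length_pyRange_one]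

theorem length_pathR (n : Int) (zs : List (Int × Int)) : ∀ j, (pathR n zs j).length = zs.length := by
  induction zs with
  | nil => intro j; simp [pathR]
  | cons z rest ih => intro j; cases z; simp only [pathR]; split_ifs <;> simp [ih]

theorem pref_zero (info : List Int) : pref info 0 = [] := by
  simp [pref, PySem.List.enumerate_nil]

theorem length_pref (info : List Int) (k : Nat) (h : k ≤ info.length) :
    (pref info k).length = k := by
  simp [pref, PySem.List.length_enumerate, h]

theorem pref_append_le (xs ys : List Int) (k : Nat) (h : k ≤ xs.length) :
    pref (xs ++ ys) k = pref xs k := by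
  simp [pref, List.take_append_of_le_length h]

theorem enumerate_singleton (t : Int) (s : Int) :
    PySem.List.enumerate [t] s = [(s, t)] := by
  rw [PySem.List.enumerate_cons, PySem.List.enumerate_nil]

theorem pref_snoc (xs : List Int) (t : Int) :
    pref (xs ++ [t]) (xs.length + 1) = ((xs.length : Int), t) :: pref xs xs.length := by
  unfold pref
  rw [List.take_of_length_le (by simp), PySem.List.enumerate_append, List.reverse_append,
    List.take_of_length_le (le_refl xs.length), enumerate_singleton]
  simp

theorem pref_succ (info : List Int) (k : Nat) (h : k < info.length) :
    pref info (k+1) = ((k : Int), info[k]) :: pref info k := by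
  unfold pref
  rw [List.take_add_one, List.getElem?_eq_getElem h]
  simp only [Option.toList_some]
  rw [PySem.List.enumerate_append, List.reverse_append, enumerate_singleton]
  simp [List.length_take, Nat.min_eq_left h.le]

theorem apVal_snoc (xs : List Int) (t : Int) :
    apVal (xs ++ [t]) = apVal xs + (10 - (xs.length : Int)) * (if t ≠ 0 then 1 else 0) := by
  unfold apVal
  rw [PySem.List.enumerate_append, enumerate_singleton, List.filter_append]
  by_cases ht : t = 0 <;> simp [ht, bne_iff_ne]

-- the DP table fold of A, characterised
theorem foldA (n : Int) (info : List Int) (hpre : n < 0 ∨ ∀ t ∈ info, -1 ≤ t) :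
    (PySem.List.enumerate info 0).foldl (aStep n)
      ((List.replicate (n+1).toNat (0 : Int)).toArray,
       (List.replicate (n+1).toNat ([] : List Int)).toArray, 0)
    = ((rowR n (pref info info.length)).toArray,
       ((PySem.List.pyRange 0 (n+1) 1).map (fun j => (pathR n (pref info info.length) j).reverse)).toArray,
       apVal info) := by
  induction info using List.reverseRecOn with
  | nil =>
    rw [PySem.List.enumerate_nil]
    simp only [List.foldl_nil, List.length_nil, pref_zero, Prod.mk.injEq]
    refine ⟨?_, ?_, ?_⟩
    · simp [rowR]
    · congr 1
      simp only [pathR, List.reverse_nil]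
      rw [List.map_const', PySem.List.length_pyRange_one]
      norm_num
    · simp [apVal, PySem.List.enumerate_nil]
  | append_singleton xs t ih =>
    have hpre' : n < 0 ∨ ∀ u ∈ xs, -1 ≤ u :=
      hpre.imp id (fun h u hu => h u (List.mem_append_left _ hu))
    rw [PySem.List.enumerate_append, List.foldl_append, ih hpre', enumerate_singleton,
      List.foldl_cons, List.foldl_nil, show (0:Int) + (xs.length:Int) = (xs.length:Int) from zero_add _]
    have hm : (xs ++ [t]).length = xs.length + 1 := by simp
    rw [hm, pref_snoc]
    unfold aStep
    simp only [Prod.mk.injEq]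
    refine ⟨?_, ?_, ?_⟩
    · -- dp row
      congr 1
      simp only [rowR, gainOf]
      apply List.map_congr_left
      intro j hj
      rw [PySem.List.mem_pyRange_one] at hj
      have hn : ¬ n < 0 := by omega
      have ht : -1 ≤ t := (hpre.resolve_left hn) t (by simp)
      rw [getD_toNat _ _ _ hj.1]
      by_cases h1 : j ≤ t
      · simp only [if_pos h1]
      · rw [getD_toNat _ _ _ (by omega : (0:Int) ≤ j - (t+1))]
        simp only [if_neg h1]
        split_ifs <;> omega
    · -- path row
      congr 1
      apply List.map_congr_left
      intro j hj
      rw [PySem.List.mem_pyRange_one] at hj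
      have hn : ¬ n < 0 := by omega
      have ht : -1 ≤ t := (hpre.resolve_left hn) t (by simp)
      have e1 : ((PySem.List.pyRange 0 (n+1) 1).map
            (fun j => (pathR n (pref xs xs.length) j).reverse)).toArray.getD j.toNat []
          = (pathR n (pref xs xs.length) j).reverse := by
        rw [getD_toNat _ _ _ hj.1]
        exact PySem.List.pyGetD_map_pyRange_of_nonneg _ _ _ _ hj.1 hj.2
      by_cases h1 : j ≤ t
      · simp [pathR, h1, e1]
      · have e2 : ((PySem.List.pyRange 0 (n+1) 1).map
              (fun j => (pathR n (pref xs xs.length) j).reverse)).toArray.getD (j - (t+1)).toNat []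
            = (pathR n (pref xs xs.length) (j - (t+1))).reverse := by
          rw [getD_toNat _ _ _ (by omega : (0:Int) ≤ j - (t+1))]
          exact PySem.List.pyGetD_map_pyRange_of_nonneg _ _ _ _ (by omega) (by omega)
        have e3 : (rowR n (pref xs xs.length)).toArray.getD j.toNat 0
            = PySem.List.pyGetD (rowR n (pref xs xs.length)) j 0 := getD_toNat _ _ _ hj.1
        have e4 : (rowR n (pref xs xs.length)).toArray.getD (j - (t+1)).toNat 0
            = PySem.List.pyGetD (rowR n (pref xs xs.length)) (j - (t+1)) 0 :=
          getD_toNat _ _ _ (by omega : (0:Int) ≤ j - (t+1))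
        simp only [pathR, gainOf, if_neg h1, e1, e2, e3, e4]
        split_ifs <;> simp
    · -- appeach
      rw [apVal_snoc]

-- B's row-table fold, characterised
theorem foldB (n : Int) (info : List Int) (hpre : n < 0 ∨ ∀ t ∈ info, -1 ≤ t) :
    (PySem.List.enumerate info 0).foldl (bRowStep n) [(List.replicate (n+1).toNat (0 : Int)).toArray]
    = (List.range (info.length + 1)).map (fun k => (rowR n (pref info k)).toArray) := by
  induction info using List.reverseRecOn with
  | nil =>
    rw [PySem.List.enumerate_nil]
    simp [pref_zero, rowR]
  | append_singleton xs t ih =>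
    have hpre' : n < 0 ∨ ∀ u ∈ xs, -1 ≤ u :=
      hpre.imp id (fun h u hu => h u (List.mem_append_left _ hu))
    rw [PySem.List.enumerate_append, List.foldl_append, ih hpre', enumerate_singleton,
      List.foldl_cons, List.foldl_nil, show (0:Int) + (xs.length:Int) = (xs.length:Int) from zero_add _]
    simp only [bRowStep]
    have hsplit : (List.range (xs.length + 1)).map (fun k => (rowR n (pref xs k)).toArray)
        = (List.range xs.length).map (fun k => (rowR n (pref xs k)).toArray)
          ++ [(rowR n (pref xs xs.length)).toArray] := by
      rw [List.range_succ]; simp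
    rw [hsplit, PySem.List.pyGetD_neg_one_append_singleton, ← hsplit]
    have hm : (xs ++ [t]).length = xs.length + 1 := by simp
    rw [hm, show List.range (xs.length + 1 + 1) = List.range (xs.length + 1) ++ [xs.length + 1]
      from List.range_succ, List.map_append]
    congr 1
    · apply List.map_congr_left
      intro k hk
      rw [List.mem_range] at hk
      rw [pref_append_le xs [t] k (by omega)]
    · simp only [List.map_cons, List.map_nil, pref_snoc]
      congr 2
      simp only [rowR, gainOf]
      apply List.map_congr_left
      intro j hj
      rw [PySem.List.mem_pyRange_one] at hj
      have hn : ¬ n < 0 := by omega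
      have ht : -1 ≤ t := (hpre.resolve_left hn) t (by simp)
      rw [getD_toNat _ _ _ hj.1]
      by_cases h1 : j ≤ t
      · simp only [if_pos h1]
      · rw [show j - t - 1 = j - (t+1) from sub_sub j t 1,
          getD_toNat _ _ _ (by omega : (0:Int) ≤ j - (t+1))]

-- B's backtracking fold produces the reversed winning path
theorem foldBT (n : Int) (info : List Int) (rows : List (Array Int))
    (hall : ∀ u ∈ info, -1 ≤ u)
    (hrows : ∀ (k : Nat), k < info.length →
      PySem.List.pyGetD rows (k : Int) #[] = (rowR n (pref info k)).toArray) :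
    ∀ (k : Nat), k ≤ info.length → ∀ (acc : List Int) (j : Int), 0 ≤ j →
    ((PySem.List.pyRange ((k : Int) - 1) (-1) (-1)).foldl (bBtStep info rows) (acc, j)).1
      = acc ++ pathR n (pref info k) j := by
  intro k
  induction k with
  | zero =>
    intro _ acc j _
    rw [show ((0:Nat) : Int) - 1 = -1 by norm_num, PySem.List.pyRange_neg_one_eq_nil (le_refl _)]
    simp [pref_zero, pathR]
  | succ k ih =>
    intro hk acc j hj
    have hk' : k < info.length := by omega
    have ht : -1 ≤ info[k] := hall _ (List.getElem_mem hk')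
    rw [show ((k+1 : Nat) : Int) - 1 = (k : Int) by push_cast; ring]
    rw [PySem.List.pyRange_neg_one_cons (by omega : (-1:Int) < (k:Int))]
    rw [List.foldl_cons]
    have hstep : bBtStep info rows (acc, j) (k : Int) =
        if j ≤ info[k] ∨ PySem.List.pyGetD (rowR n (pref info k)) (j - (info[k] + 1)) 0 + gainOf k info[k]
            < PySem.List.pyGetD (rowR n (pref info k)) j 0
        then (acc ++ [(0:Int)], j)
        else (acc ++ [info[k] + 1], j - (info[k] + 1)) := by
      simp only [bBtStep]
      rw [PySem.List.pyGetD_natCast info k 0, List.getD_eq_getElem info 0 hk', hrows k hk']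
      by_cases h1 : j ≤ info[k]
      · rw [if_pos (Or.inl h1), if_pos (Or.inl h1)]
      · rw [show j - info[k] - 1 = j - (info[k] + 1) from sub_sub j info[k] 1,
          getD_toNat _ _ _ (by omega : (0:Int) ≤ j - (info[k] + 1)),
          getD_toNat _ _ _ hj]
        simp only [gainOf]
        rfl
    rw [hstep, pref_succ info k hk']
    simp only [pathR, gainOf]
    by_cases h1 : j ≤ info[k]
    · rw [if_pos (Or.inl h1), ih (by omega) _ _ hj, if_pos h1, List.append_assoc]
      rfl
    · by_cases h2 : PySem.List.pyGetD (rowR n (pref info k)) (j - (info[k] + 1)) 0 + (10 - (k:Int)) * (if info[k] ≠ 0 then 2 else 1)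
          ≥ PySem.List.pyGetD (rowR n (pref info k)) j 0
      · rw [if_neg (not_or.2 ⟨h1, not_lt.2 (by simpa [gainOf] using h2)⟩), ih (by omega) _ _ (by omega),
          if_neg h1, if_pos h2, List.append_assoc]
        rfl
      · rw [if_pos (Or.inr (by simpa [gainOf] using not_le.mp h2)), ih (by omega) _ _ hj,
          if_neg h1, if_neg h2, List.append_assoc]
        rfl

-- A's final scan: running strict max = first index of the maximum
theorem scanA (g : Int → List Int) (ap : Int) :
    ∀ (vs : List Int) (s r0 : Int) (p0 : Option (List Int)),
    (PySem.List.enumerate vs s).foldl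
      (fun acc iv => if iv.2 - ap > acc.1 then (iv.2 - ap, some (g iv.1)) else acc) (r0, p0)
    = (vs.foldl (fun a v => max a (v - ap)) r0,
       if vs.foldl (fun a v => max a (v - ap)) r0 > r0
       then some (g (s + ((vs.idxOf (vs.foldl (fun a v => max a (v - ap)) r0 + ap)) : Nat)))
       else p0) := by
  intro vs
  induction vs with
  | nil => intro s r0 p0; simp [PySem.List.enumerate_nil]
  | cons v rest ih =>
    intro s r0 p0
    rw [PySem.List.enumerate_cons, List.foldl_cons, List.foldl_cons]
    have hbound := (PySem.List.le_foldl_max_int rest (fun v => v - ap) (v - ap)).1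
    by_cases hv : v - ap > r0
    · rw [if_pos hv, ih (s+1) (v - ap) (some (g s))]
      have hfst : rest.foldl (fun a v => max a (v - ap)) (max r0 (v - ap))
          = rest.foldl (fun a v => max a (v - ap)) (v - ap) := by
        rw [max_eq_right (le_of_lt hv)]
      rw [hfst]
      refine Prod.ext rfl ?_
      simp only
      rw [if_pos (show rest.foldl (fun a v => max a (v - ap)) (v - ap) > r0 by omega)]
      by_cases hgt : rest.foldl (fun a v => max a (v - ap)) (v - ap) > v - ap
      · rw [if_pos hgt,
          List.idxOf_cons_ne _ (by omega : v ≠ rest.foldl (fun a v => max a (v - ap)) (v - ap) + ap)]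
        congr 2
        omega
      · rw [if_neg hgt]
        have hMv : rest.foldl (fun a v => max a (v - ap)) (v - ap) = v - ap := by omega
        rw [hMv, sub_add_cancel, List.idxOf_cons_self]
        simp
    · rw [if_neg hv, ih (s+1) r0 p0]
      have hfst : rest.foldl (fun a v => max a (v - ap)) (max r0 (v - ap))
          = rest.foldl (fun a v => max a (v - ap)) r0 := by
        rw [max_eq_left (by omega)]
      rw [hfst]
      refine Prod.ext rfl ?_
      simp only
      by_cases hgt : rest.foldl (fun a v => max a (v - ap)) r0 > r0
      · rw [if_pos hgt, if_pos hgt,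
          List.idxOf_cons_ne _ (by omega : v ≠ rest.foldl (fun a v => max a (v - ap)) r0 + ap)]
        congr 2
        omega
      · rw [if_neg hgt, if_neg hgt]

  -- r0-shifted running max equals max of the plain running max
theorem maxShift (ap : Int) :
    ∀ (rest : List Int) (c r0 : Int),
    rest.foldl (fun a v => max a (v - ap)) (max r0 (c - ap)) = max r0 (rest.foldl max c - ap) := by
  intro rest
  induction rest with
  | nil => intro c r0; simp
  | cons v rest ih =>
    intro c r0
    rw [List.foldl_cons, List.foldl_cons]
    rw [show max (max r0 (c - ap)) (v - ap) = max r0 (max c v - ap) by omega]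
    exact ih (max c v) r0

theorem idxOf?_getD (l : List Int) (v : Int) (h : v ∈ l) : (List.idxOf? v l).getD 0 = l.idxOf v := by
  have h2 := List.isSome_idxOf?.2 h
  rw [List.idxOf_eq_getD_idxOf?]
  cases hx : List.idxOf? v l
  · simp [hx] at h2
  · simp

-- B's row table, indexed
theorem rows_getD (n : Int) (info : List Int) (k : Nat) (hk : k < info.length) :
    PySem.List.pyGetD ((List.range (info.length + 1)).map (fun k => (rowR n (pref info k)).toArray)) (k : Int) #[]
      = (rowR n (pref info k)).toArray := by
  rw [PySem.List.pyGetD_natCast, PySem.List.getD_map_range _ _ _ _ (by omega)]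

theorem rows_last (n : Int) (info : List Int) :
    PySem.List.pyGetD ((List.range (info.length + 1)).map (fun k => (rowR n (pref info k)).toArray)) (-1) #[]
      = (rowR n (pref info info.length)).toArray := by
  rw [List.range_succ, List.map_append, List.map_cons, List.map_nil,
    PySem.List.pyGetD_neg_one_append_singleton]

-- ===== VERDICT (by name: the statement is the Claim_ definition above) =====
theorem solution_spec : Claim_equal_solution := by
  intro n info _ hpre
  unfold Pre_solution at hpre
  unfold Spec_solution
  simp only [solution, solution_alt]
  rw [foldA n info hpre, foldB n info hpre,
    show (((PySem.List.enumerate info 0).filter (fun it => it.2 != 0)).map (fun it => 10 - it.1)).sum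
      = apVal info from rfl]
  by_cases hn : n < 0
  · rw [if_pos hn, PySem.List.pyRange_one_eq_nil (by omega), List.foldl_nil]
  · rw [if_neg hn]
    have hn0 : 0 ≤ n := by omega
    have hlenR : (rowR n (pref info info.length)).length = (n+1).toNat := length_rowR n _
    have hNe : rowR n (pref info info.length) ≠ [] := by
      intro h; rw [h] at hlenR; simp at hlenR; omega
    obtain ⟨c, rest, hR⟩ := List.exists_cons_of_ne_nil hNe
    have hconv : (PySem.List.pyRange 0 (n+1) 1).foldl (fun acc i =>
        if (rowR n (pref info info.length)).toArray.getD i.toNat 0 - apVal info > acc.1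
        then ((rowR n (pref info info.length)).toArray.getD i.toNat 0 - apVal info,
              some (((PySem.List.pyRange 0 (n+1) 1).map
                (fun j => (pathR n (pref info info.length) j).reverse)).toArray.getD i.toNat []))
        else acc) ((0 : Int), (none : Option (List Int)))
        = (PySem.List.enumerate (rowR n (pref info info.length)) 0).foldl (fun acc iv =>
            if iv.2 - apVal info > acc.1
            then (iv.2 - apVal info, some (((PySem.List.pyRange 0 (n+1) 1).map
                (fun j => (pathR n (pref info info.length) j).reverse)).toArray.getD iv.1.toNat []))
            else acc) ((0 : Int), (none : Option (List Int))) := by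
      rw [PySem.List.enumerate_eq_map_pyRange _ (0 : Int), PySem.List.len_eq, hlenR,
        show (((n+1).toNat : Int)) = n + 1 by omega, List.foldl_map]
      apply PySem.List.foldl_congr_mem
      intro acc i hi
      rw [PySem.List.mem_pyRange_one] at hi
      rw [getD_toNat _ _ _ hi.1]
    rw [hconv]
    rw [scanA (fun i => ((PySem.List.pyRange 0 (n+1) 1).map
        (fun j => (pathR n (pref info info.length) j).reverse)).toArray.getD i.toNat [])
        (apVal info) (rowR n (pref info info.length)) 0 0 none]
    rw [rows_last n info, List.toList_toArray]
    have hbest : (PySem.List.max? (rowR n (pref info info.length)) (fun x => x)).getD 0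
        = rest.foldl max c := by
      rw [hR, PySem.List.max?_id_cons, Option.getD_some]
    rw [hbest]
    have hM : (rowR n (pref info info.length)).foldl (fun a v => max a (v - apVal info)) 0
        = max 0 (rest.foldl max c - apVal info) := by
      rw [hR, List.foldl_cons]
      exact maxShift (apVal info) rest c 0
    rw [hM]
    by_cases hb : rest.foldl max c - apVal info ≤ 0
    · rw [if_neg (by omega), if_pos (by omega)]
    · have hbgt : rest.foldl max c - apVal info > 0 := by omega
      rw [if_pos (by omega), if_neg (by omega)]
      have hMv : max 0 (rest.foldl max c - apVal info) + apVal info = rest.foldl max c := by omega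
      rw [hMv]
      -- the chosen budget index
      have hmem : rest.foldl max c ∈ rowR n (pref info info.length) := by
        rcases PySem.List.foldl_max_mem rest c with h | h
        · rw [hR, h]; exact List.mem_cons_self
        · rw [hR]; exact List.mem_cons_of_mem _ h
      have hidx : (PySem.List.index? (rowR n (pref info info.length)) (rest.foldl max c)).getD 0
          = (rowR n (pref info info.length)).idxOf (rest.foldl max c) := by
        rw [PySem.List.index?_eq_idxOf?, idxOf?_getD _ _ hmem]
      rw [hidx]
      set kx := (rowR n (pref info info.length)).idxOf (rest.foldl max c) with hkx
      have hkxlt : kx < (n+1).toNat := by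
        rw [hkx, ← hlenR]; exact List.idxOf_lt_length_of_mem hmem
      -- info is nonempty in this branch
      have hm1 : info ≠ [] := by
        intro h
        subst h
        simp only [List.length_nil, pref_zero] at hR
        have hall : ∀ x ∈ (c :: rest), x = (0:Int) := by
          rw [← hR]
          simp only [rowR]
          intro x hx
          exact List.eq_of_mem_replicate hx
        have hc : c = 0 := hall c List.mem_cons_self
        have hbm : rest.foldl max c = 0 := by
          rcases PySem.List.foldl_max_mem rest c with h' | h'
          · rw [h', hc]
          · exact hall _ (List.mem_cons_of_mem _ h')
        have hap0 : apVal [] = 0 := by simp [apVal, PySem.List.enumerate_nil]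
        omega
      have hmlen : 0 < info.length := List.length_pos_of_ne_nil hm1
      -- A's chosen path cell
      have hpath : ((PySem.List.pyRange 0 (n+1) 1).map
            (fun j => (pathR n (pref info info.length) j).reverse)).toArray.getD (0 + (kx : Int)).toNat []
          = (pathR n (pref info info.length) (kx : Int)).reverse := by
        rw [zero_add, getD_toNat _ _ _ (by omega)]
        exact PySem.List.pyGetD_map_pyRange_of_nonneg _ _ _ _ (by omega) (by omega)
      rw [hpath]
      -- B's backtracking result
      rw [foldBT n info _ (hpre.resolve_left hn) (fun k hk => rows_getD n info k hk)
          info.length (le_refl _) [] (kx : Int) (by omega), List.nil_append]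
      -- A's nonemptiness guard
      have hpne : (pathR n (pref info info.length) (kx : Int)).reverse ≠ [] := by
        intro h
        rw [List.reverse_eq_nil_iff] at h
        have h0 := length_pathR n (pref info info.length) (kx : Int)
        rw [h, length_pref info info.length (le_refl _)] at h0
        simp at h0
        omega
      simp [hpne]
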